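-- pv_equiv track=rewrite | github.com/minion12345678/filechunkmatch | doc_bot.py | find_best_chunk
-- ===== SOURCE A (Python) =====
-- def find_best_chunk(chunks, query):
--     """Finds the chunk that matches the query best."""
--     best_score = -1
--     best_chunk = None
--
--     query_words = set(query.lower().split())
--
--     for chunk in chunks:
--         chunk_words = set(chunk.lower().split())
--         score = len(query_words.intersection(chunk_words))  # simple overlap
--
--         if score > best_score:
--             best_score = score
--             best_chunk = chunk
--
--     return best_chunk
-- ===== SOURCE B (Python) =====
-- def find_best_chunk(chunks, query):
--     """Finds the chunk that matches the query best."""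
--     query_words = set(query.lower().split())
--     chunk_sets = [set(c.lower().split()) for c in chunks]
--     scores = [0] * len(chunks)
--     for w in query_words:
--         scores = [s + 1 if w in cw else s for s, cw in zip(scores, chunk_sets)]
--     best_score, best_chunk = -1, None
--     for s, chunk in zip(scores, chunks):
--         if s > best_score:
--             best_score, best_chunk = s, chunk
--     return best_chunk
-- ===== Notes on version B (the rewrite author's own statement) =====
-- stated objective: alternative
-- what changed: B transposes the computation: instead of scoring each chunk by a set intersection inside the selection loop, it accumulates a score vector word-by-word over the query (adding an indicator vector per query word) and then scans the score/chunk pairs once for the first maximum.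
import Mathlib
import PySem

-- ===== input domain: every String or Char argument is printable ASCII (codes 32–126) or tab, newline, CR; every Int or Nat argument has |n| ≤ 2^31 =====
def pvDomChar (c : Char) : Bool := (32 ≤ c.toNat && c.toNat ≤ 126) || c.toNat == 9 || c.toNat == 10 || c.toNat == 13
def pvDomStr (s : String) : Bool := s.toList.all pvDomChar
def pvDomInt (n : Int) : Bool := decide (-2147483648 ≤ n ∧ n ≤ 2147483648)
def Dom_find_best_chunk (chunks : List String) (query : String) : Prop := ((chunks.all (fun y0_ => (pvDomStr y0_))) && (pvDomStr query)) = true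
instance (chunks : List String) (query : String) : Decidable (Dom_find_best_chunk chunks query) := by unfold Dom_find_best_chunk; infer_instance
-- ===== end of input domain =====

-- B replaces A's per-chunk set intersection inside the selection loop by a transposed
-- accumulation: a score vector updated once per query word, then a single argmax scan
-- over the score/chunk pairs (objective: alternative, same cost).

-- set(s.lower().split()) — used by both Pythons in this exact form
def pvWordSet (s : String) : PySem.Set String :=
  PySem.Set.ofList (PySem.Str.split₀ (PySem.Str.lower s))

-- ===== PORT A =====
def find_best_chunk (chunks : List String) (query : String) : Option String :=
  let query_words := pvWordSet query
  (chunks.foldl (fun (st : Int × Option String) chunk =>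
      let chunk_words := pvWordSet chunk
      let score : Int := PySem.Set.len (PySem.Set.inter query_words chunk_words)
      if score > st.1 then (score, some chunk) else st)
    ((-1 : Int), (none : Option String))).2

-- ===== PORT B =====
def find_best_chunk_alt (chunks : List String) (query : String) : Option String :=
  let query_words := pvWordSet query
  let chunk_sets := chunks.map pvWordSet
  let scores0 : List Int := List.replicate chunks.length 0
  -- per-word indicator updates of the score vector (order-independent, so iterating
  -- the Set's element list is exact)
  let scores := query_words.foldl
      (fun sc w => List.zipWith (fun s cw => if PySem.Set.contains cw w then s + 1 else s) sc chunk_sets)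
      scores0
  ((scores.zip chunks).foldl (fun (st : Int × Option String) p =>
      if p.1 > st.1 then (p.1, some p.2) else st)
    ((-1 : Int), (none : Option String))).2

-- ===== PRECONDITION & SPEC =====
def Spec_find_best_chunk (chunks : List String) (query : String) (out : Option String) : Prop := out = find_best_chunk_alt chunks query
instance (chunks : List String) (query : String) (out : Option String) : Decidable (Spec_find_best_chunk chunks query out) := by unfold Spec_find_best_chunk; infer_instance

-- ===== CLAIM (what is proved, stated in full; the proofs are below) =====
def Claim_equal_find_best_chunk : Prop := ∀ (chunks : List String) (query : String), Dom_find_best_chunk chunks query → Spec_find_best_chunk chunks query (find_best_chunk chunks query)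

-- ===== LEMMAS AND PROOFS =====

-- number of words of ws that lie in the set cw (= len(set ∩), A's score)
def pvCnt (ws : List String) (cw : PySem.Set String) : Int :=
  ((ws.filter (fun w => PySem.Set.contains cw w)).length : Int)

lemma pv_zipWith_self : ∀ (a : List Int) (b : List (PySem.Set String)),
    a.length ≤ b.length → List.zipWith (fun s (_ : PySem.Set String) => s) a b = a := by
  intro a
  induction a with
  | nil => intro b _; simp
  | cons x xs ih =>
      intro b h
      cases b with
      | nil => simp at h
      | cons c cs => simp at h ⊢; exact ih cs h

lemma pv_zipWith_zipWith (f g : Int → PySem.Set String → Int) :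
    ∀ (a : List Int) (b : List (PySem.Set String)),
    List.zipWith f (List.zipWith g a b) b = List.zipWith (fun s c => f (g s c) c) a b := by
  intro a
  induction a with
  | nil => intro b; simp
  | cons x xs ih =>
      intro b
      cases b with
      | nil => simp
      | cons c cs => simp [ih]

lemma pv_scores (csets : List (PySem.Set String)) :
    ∀ (ws : List String) (scores : List Int), scores.length = csets.length →
    ws.foldl (fun sc w => List.zipWith (fun s cw => if PySem.Set.contains cw w then s + 1 else s) sc csets) scores
      = List.zipWith (fun s cw => s + pvCnt ws cw) scores csets := by
  intro ws
  induction ws with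
  | nil =>
      intro scores h
      simp only [List.foldl_nil]
      have he : (fun s (cw : PySem.Set String) => s + pvCnt [] cw)
          = fun s (_ : PySem.Set String) => s := by
        funext s c; simp [pvCnt]
      rw [he, pv_zipWith_self scores csets (le_of_eq h)]
  | cons w ws ih =>
      intro scores h
      simp only [List.foldl_cons]
      have hlen : (List.zipWith (fun s cw => if PySem.Set.contains cw w then s + 1 else s) scores csets).length = csets.length := by
        simp [List.length_zipWith, h]
      rw [ih _ hlen, pv_zipWith_zipWith]
      have he : (fun s (c : PySem.Set String) => (if PySem.Set.contains c w then s + 1 else s) + pvCnt ws c)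
          = fun s (cw : PySem.Set String) => s + pvCnt (w :: ws) cw := by
        funext s c
        by_cases hc : w ∈ c <;>
          simp [pvCnt, List.filter_cons, PySem.Set.contains_iff, hc] <;> push_cast <;> omega
      rw [he]

lemma pv_zip_replicate (qw : List String) :
    ∀ (l : List String),
    List.zipWith (fun s cw => s + pvCnt qw cw) (List.replicate l.length 0) (l.map pvWordSet)
      = l.map (fun c => pvCnt qw (pvWordSet c)) := by
  intro l
  induction l with
  | nil => simp
  | cons c cs ih => simp [List.replicate_succ, ih]

lemma pv_zip_map (g : String → Int) :
    ∀ (l : List String), (l.map g).zip l = l.map (fun c => (g c, c)) := by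
  intro l
  induction l with
  | nil => simp
  | cons c cs ih => simp [ih]

-- ===== VERDICT (by name: the statement is the Claim_ definition above) =====
theorem find_best_chunk_spec : Claim_equal_find_best_chunk := by
  intro chunks query _
  unfold Spec_find_best_chunk find_best_chunk find_best_chunk_alt
  simp only []
  rw [pv_scores (chunks.map pvWordSet) (pvWordSet query) (List.replicate chunks.length 0) (by simp),
      pv_zip_replicate, pv_zip_map, List.foldl_map]
  rfl
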